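-- pv_equiv track=rewrite | github.com/PythonNut/ernos-enigma | rcube_tests.py | convert_moves_to_nice_moves
-- ===== SOURCE A (Python) =====
-- def apply_x_clock_to_moves(string):
--     return string.translate(str.maketrans("dfubDFUB","fubdFUBD"))
--
-- def apply_x_counter_to_moves(string):
--     return string.translate(str.maketrans("dfubDFUB","bdfuBDFU"))
--
-- def apply_z_clock_to_moves(string):
--     return string.translate(str.maketrans("urdlURDL","rdluRDLU"))
--
-- def apply_z_counter_to_moves(string):
--     return string.translate(str.maketrans("urdlURDL","lurdLURD"))
--
-- def convert_moves_to_nice_moves(string):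
--     out = ""
--     while len(string) > 0:
--         if string[0] == "d":
--             out += "Z"
--             string = apply_z_clock_to_moves(string)
--         elif string[0] == "D":
--             out += "z"
--             string = apply_z_counter_to_moves(string)
--         elif string[0] == "f" or string[0] == "F":
--             out += "X"
--             string = apply_x_clock_to_moves(string)
--         elif string[0] == "b" or string[0] == "B":
--             out += "x"
--             string = apply_x_counter_to_moves(string)
--         else:
--             out += string[0]
--             string = string[1:]
--     return out
-- ===== SOURCE B (Python) =====
-- ZC = dict(zip("urdlURDL", "rdluRDLU"))
-- ZCC = dict(zip("urdlURDL", "lurdLURD"))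
-- XC = dict(zip("dfubDFUB", "fubdFUBD"))
-- XCC = dict(zip("dfubDFUB", "bdfuBDFU"))
--
-- def convert_moves_to_nice_moves(string):
--     # single pass: maintain the composed relabelling as a constant-size dict
--     perm = {c: c for c in "urdlfbURDLFB"}
--     out = []
--     for ch in string:
--         c = perm.get(ch, ch)
--         while True:
--             if c == "d":
--                 out.append("Z"); t = ZC
--             elif c == "D":
--                 out.append("z"); t = ZCC
--             elif c == "f" or c == "F":
--                 out.append("X"); t = XC
--             elif c == "b" or c == "B":
--                 out.append("x"); t = XCC
--             else:
--                 out.append(c); break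
--             perm = {k: t.get(v, v) for k, v in perm.items()}
--             c = t.get(c, c)
--     return "".join(out)
-- ===== Notes on version B (the rewrite author's own statement) =====
-- stated objective: faster
-- what changed: A re-translates the entire remaining string at every reorientation (quadratic); B does a single pass over the input, maintaining the composed relabelling as one constant-size (12-key) dictionary and expanding each character through a bounded inner loop.
import Mathlib
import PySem

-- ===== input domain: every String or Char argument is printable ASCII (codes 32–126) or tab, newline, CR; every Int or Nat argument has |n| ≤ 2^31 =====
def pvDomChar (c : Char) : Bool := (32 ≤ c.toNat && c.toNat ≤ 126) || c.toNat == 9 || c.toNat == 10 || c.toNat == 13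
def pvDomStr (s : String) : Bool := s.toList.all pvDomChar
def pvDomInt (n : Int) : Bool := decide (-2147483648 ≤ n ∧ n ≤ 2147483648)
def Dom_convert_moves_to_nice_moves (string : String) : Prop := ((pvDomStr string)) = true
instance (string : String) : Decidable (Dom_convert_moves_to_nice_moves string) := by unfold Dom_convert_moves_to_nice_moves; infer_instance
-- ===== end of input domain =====

-- B replaces A's quadratic "re-translate the whole remaining string at each reorientation"
-- by a single pass that maintains the composed constant-size relabelling; measurably faster (objective: faster).

-- ===== PORT A =====
-- the four maketrans tables (shared literal data; each port uses them its own way)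
def pvZC : PySem.Dict Char Char := PySem.Dict.mk [('u','r'),('r','d'),('d','l'),('l','u'),('U','R'),('R','D'),('D','L'),('L','U')]
def pvZCC : PySem.Dict Char Char := PySem.Dict.mk [('u','l'),('r','u'),('d','r'),('l','d'),('U','L'),('R','U'),('D','R'),('L','D')]
def pvXC : PySem.Dict Char Char := PySem.Dict.mk [('d','f'),('f','u'),('u','b'),('b','d'),('D','F'),('F','U'),('U','B'),('B','D')]
def pvXCC : PySem.Dict Char Char := PySem.Dict.mk [('d','b'),('f','d'),('u','f'),('b','u'),('D','B'),('F','D'),('U','F'),('B','U')]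

-- str.translate: replace each mapped character, leave the rest
def pvAp (t : PySem.Dict Char Char) (c : Char) : Char := PySem.Dict.getD t c c

-- weight used only for termination of A's while loop (and B's inner loop)
def pvW (c : Char) : Nat :=
  if c = 'b' ∨ c = 'B' then 2
  else if c = 'd' ∨ c = 'D' ∨ c = 'f' ∨ c = 'F' then 1
  else 0

def pvMeas : List Char → Nat
  | [] => 0
  | c :: r => 3 * (r.length + 1) + pvW c

theorem pvW_le (c : Char) : pvW c ≤ 2 := by
  unfold pvW; split_ifs <;> omega

theorem pvMeas_le (s : List Char) : pvMeas s ≤ 3 * s.length + 2 := by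
  cases s with
  | nil => simp [pvMeas]
  | cons c r => have := pvW_le c; simp only [pvMeas, List.length_cons]; omega

-- the while loop of A: translate the whole remaining string at each reorientation
def pvALoop : List Char → List Char
  | [] => []
  | c :: r =>
    if c = 'd' then 'Z' :: pvALoop ((c :: r).map (pvAp pvZC))
    else if c = 'D' then 'z' :: pvALoop ((c :: r).map (pvAp pvZCC))
    else if c = 'f' ∨ c = 'F' then 'X' :: pvALoop ((c :: r).map (pvAp pvXC))
    else if c = 'b' ∨ c = 'B' then 'x' :: pvALoop ((c :: r).map (pvAp pvXCC))
    else c :: pvALoop r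
termination_by s => pvMeas s
decreasing_by
  · subst c
    simp only [List.map_cons, pvMeas, List.length_map]
    have h : pvW (pvAp pvZC 'd') < pvW 'd' := by decide
    omega
  · subst c
    simp only [List.map_cons, pvMeas, List.length_map]
    have h : pvW (pvAp pvZCC 'D') < pvW 'D' := by decide
    omega
  · have hf : pvW (pvAp pvXC 'f') < pvW 'f' := by decide
    have hF : pvW (pvAp pvXC 'F') < pvW 'F' := by decide
    rcases ‹c = 'f' ∨ c = 'F'› with h | h <;> subst h <;>
      (simp only [List.map_cons, pvMeas, List.length_map]; omega)
  · have hf : pvW (pvAp pvXCC 'b') < pvW 'b' := by decide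
    have hF : pvW (pvAp pvXCC 'B') < pvW 'B' := by decide
    rcases ‹c = 'b' ∨ c = 'B'› with h | h <;> subst h <;>
      (simp only [List.map_cons, pvMeas, List.length_map]; omega)
  · have h1 := pvMeas_le r
    have h2 : pvMeas (c :: r) = 3 * (r.length + 1) + pvW c := rfl
    omega

def convert_moves_to_nice_moves (string : String) : String :=
  String.ofList (pvALoop string.toList)

-- ===== PORT B =====
-- {k: t.get(v, v) for k, v in perm.items()}
def pvCompose (perm t : PySem.Dict Char Char) : PySem.Dict Char Char :=
  PySem.Dict.mk (perm.items.map (fun kv => (kv.1, pvAp t kv.2)))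

-- the inner while-True loop of B: emit the nice letters for one effective character
def pvBInner (perm : PySem.Dict Char Char) (c : Char) : List Char × PySem.Dict Char Char :=
  if c = 'd' then
    let res := pvBInner (pvCompose perm pvZC) (pvAp pvZC c); ('Z' :: res.1, res.2)
  else if c = 'D' then
    let res := pvBInner (pvCompose perm pvZCC) (pvAp pvZCC c); ('z' :: res.1, res.2)
  else if c = 'f' ∨ c = 'F' then
    let res := pvBInner (pvCompose perm pvXC) (pvAp pvXC c); ('X' :: res.1, res.2)
  else if c = 'b' ∨ c = 'B' then
    let res := pvBInner (pvCompose perm pvXCC) (pvAp pvXCC c); ('x' :: res.1, res.2)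
  else ([c], perm)
termination_by pvW c
decreasing_by
  · subst c; decide
  · subst c; decide
  · rcases ‹c = 'f' ∨ c = 'F'› with h | h <;> subst h <;> decide
  · rcases ‹c = 'b' ∨ c = 'B'› with h | h <;> subst h <;> decide


-- the for loop of B
def pvBLoop (perm : PySem.Dict Char Char) : List Char → List Char
  | [] => []
  | ch :: rest =>
    let res := pvBInner perm (PySem.Dict.getD perm ch ch)
    res.1 ++ pvBLoop res.2 rest

-- {c: c for c in "urdlfbURDLFB"}
def pvPerm0 : PySem.Dict Char Char :=
  PySem.Dict.mk ("urdlfbURDLFB".toList.map (fun c => (c, c)))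

def convert_moves_to_nice_moves_alt (string : String) : String :=
  String.ofList (pvBLoop pvPerm0 string.toList)

-- ===== PRECONDITION & SPEC =====
def Spec_convert_moves_to_nice_moves (string : String) (out : String) : Prop := out = convert_moves_to_nice_moves_alt string
instance (string : String) (out : String) : Decidable (Spec_convert_moves_to_nice_moves string out) := by unfold Spec_convert_moves_to_nice_moves; infer_instance

-- ===== CLAIM (what is proved, stated in full; the proofs are below) =====
def Claim_equal_convert_moves_to_nice_moves : Prop := ∀ (string : String), Dom_convert_moves_to_nice_moves string → Spec_convert_moves_to_nice_moves string (convert_moves_to_nice_moves string)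


-- ===== LEMMAS AND PROOFS =====

-- proof-side abbreviation: the 12 characters the relabelling dictionaries act on
def pvBase : List Char := "urdlfbURDLFB".toList

theorem pvALoop_cons (c : Char) (r : List Char) :
    pvALoop (c :: r) =
      if c = 'd' then 'Z' :: pvALoop ((c :: r).map (pvAp pvZC))
      else if c = 'D' then 'z' :: pvALoop ((c :: r).map (pvAp pvZCC))
      else if c = 'f' ∨ c = 'F' then 'X' :: pvALoop ((c :: r).map (pvAp pvXC))
      else if c = 'b' ∨ c = 'B' then 'x' :: pvALoop ((c :: r).map (pvAp pvXCC))
      else c :: pvALoop r := by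
  rw [pvALoop]

theorem pvBInner_eq (perm : PySem.Dict Char Char) (c : Char) :
    pvBInner perm c =
      if c = 'd' then
        ('Z' :: (pvBInner (pvCompose perm pvZC) (pvAp pvZC c)).1, (pvBInner (pvCompose perm pvZC) (pvAp pvZC c)).2)
      else if c = 'D' then
        ('z' :: (pvBInner (pvCompose perm pvZCC) (pvAp pvZCC c)).1, (pvBInner (pvCompose perm pvZCC) (pvAp pvZCC c)).2)
      else if c = 'f' ∨ c = 'F' then
        ('X' :: (pvBInner (pvCompose perm pvXC) (pvAp pvXC c)).1, (pvBInner (pvCompose perm pvXC) (pvAp pvXC c)).2)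
      else if c = 'b' ∨ c = 'B' then
        ('x' :: (pvBInner (pvCompose perm pvXCC) (pvAp pvXCC c)).1, (pvBInner (pvCompose perm pvXCC) (pvAp pvXCC c)).2)
      else ([c], perm) := by
  rw [pvBInner]

theorem pvALoop_nil : pvALoop [] = [] := by rw [pvALoop]

theorem pvBLoop_cons (perm : PySem.Dict Char Char) (ch : Char) (rest : List Char) :
    pvBLoop perm (ch :: rest) =
      (pvBInner perm (pvAp perm ch)).1 ++ pvBLoop (pvBInner perm (pvAp perm ch)).2 rest := rfl

theorem pv_get?_mk_map (l : List (Char × Char)) (f : Char → Char) (c : Char) :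
    (PySem.Dict.mk (l.map (fun kv => (kv.1, f kv.2)))).get? c
      = ((PySem.Dict.mk l).get? c).map f := by
  induction l with
  | nil => simp [PySem.Dict.get?]
  | cons kv rest ih =>
    obtain ⟨k, v⟩ := kv
    simp only [List.map_cons, PySem.Dict.get?_mk_cons]
    cases h : (k == c) <;> simp [ih]

theorem pv_keys_compose (perm t : PySem.Dict Char Char) :
    (pvCompose perm t).keys = perm.keys := by
  obtain ⟨l⟩ := perm
  induction l with
  | nil => rfl
  | cons kv rest ih =>
    simp only [pvCompose, PySem.Dict.keys, List.map_cons, List.map_map] at ih ⊢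
    simp

theorem pv_ap_notin (t : PySem.Dict Char Char) (ht : t.keys ⊆ pvBase)
    (c : Char) (hc : c ∉ pvBase) : pvAp t c = c := by
  have h : t.get? c = none := by
    rw [PySem.Dict.get?_eq_none_iff_not_mem_keys]
    exact fun hmem => hc (ht hmem)
  simp [pvAp, PySem.Dict.getD_eq_get?_getD, h]

theorem pv_compose_ap (perm t : PySem.Dict Char Char) (hk : perm.keys = pvBase)
    (ht : t.keys ⊆ pvBase) (c : Char) :
    pvAp (pvCompose perm t) c = pvAp t (pvAp perm c) := by
  obtain ⟨l⟩ := perm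
  have hh := pv_get?_mk_map l (pvAp t) c
  have hq : (pvCompose (PySem.Dict.mk l) t).get? c
      = Option.map (pvAp t) ((PySem.Dict.mk l).get? c) := hh
  cases hg : (PySem.Dict.mk l).get? c with
  | some v =>
    have h1 : pvAp (PySem.Dict.mk l) c = v := by
      simp [pvAp, PySem.Dict.getD_eq_get?_getD, hg]
    rw [h1]
    simp [pvAp, PySem.Dict.getD_eq_get?_getD, hq, hg]
  | none =>
    have h1 : pvAp (PySem.Dict.mk l) c = c := by
      simp [pvAp, PySem.Dict.getD_eq_get?_getD, hg]
    have hc : c ∉ pvBase := by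
      rw [PySem.Dict.get?_eq_none_iff_not_mem_keys] at hg
      rw [← hk]; exact hg
    rw [h1, pv_ap_notin t ht c hc]
    simp [pvAp, PySem.Dict.getD_eq_get?_getD, hq, hg]

theorem pv_keys_ZC : pvZC.keys ⊆ pvBase := by decide
theorem pv_keys_ZCC : pvZCC.keys ⊆ pvBase := by decide
theorem pv_keys_XC : pvXC.keys ⊆ pvBase := by decide
theorem pv_keys_XCC : pvXCC.keys ⊆ pvBase := by decide

theorem pv_main (n : Nat) : ∀ (s : List Char) (perm : PySem.Dict Char Char),
    perm.keys = pvBase → pvMeas (s.map (pvAp perm)) ≤ n →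
    pvALoop (s.map (pvAp perm)) = pvBLoop perm s := by
  induction n with
  | zero =>
    intro s perm hk hle
    cases s with
    | nil => rw [List.map_nil, pvALoop_nil]; rfl
    | cons ch r =>
      exfalso
      have hm : pvMeas ((ch :: r).map (pvAp perm))
          = 3 * (r.length + 1) + pvW (pvAp perm ch) := by
        simp [pvMeas]
      omega
  | succ n ih =>
    intro s perm hk hle
    cases s with
    | nil => rw [List.map_nil, pvALoop_nil]; rfl
    | cons ch r =>
      have hmeas : pvMeas ((ch :: r).map (pvAp perm))
          = 3 * (r.length + 1) + pvW (pvAp perm ch) := by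
        simp [pvMeas]
      have step : ∀ (t : PySem.Dict Char Char), t.keys ⊆ pvBase →
          pvW (pvAp t (pvAp perm ch)) < pvW (pvAp perm ch) →
          pvALoop (((ch :: r).map (pvAp perm)).map (pvAp t))
              = pvBLoop (pvCompose perm t) (ch :: r) ∧
          pvAp (pvCompose perm t) ch = pvAp t (pvAp perm ch) := by
        intro t ht hw
        have hap : ∀ a, pvAp (pvCompose perm t) a = pvAp t (pvAp perm a) :=
          pv_compose_ap perm t hk ht
        have hmap : ((ch :: r).map (pvAp perm)).map (pvAp t)
            = (ch :: r).map (pvAp (pvCompose perm t)) := by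
          rw [List.map_map]
          exact List.map_congr_left (fun a _ => (hap a).symm)
        have hk' : (pvCompose perm t).keys = pvBase := by
          rw [pv_keys_compose]; exact hk
        have hle' : pvMeas ((ch :: r).map (pvAp (pvCompose perm t))) ≤ n := by
          have h2 : pvMeas ((ch :: r).map (pvAp (pvCompose perm t)))
              = 3 * (r.length + 1) + pvW (pvAp (pvCompose perm t) ch) := by
            simp [pvMeas]
          rw [h2, hap ch]
          omega
        exact ⟨by rw [hmap]; exact ih (ch :: r) (pvCompose perm t) hk' hle', hap ch⟩
      by_cases h1 : pvAp perm ch = 'd'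
      · have hw : pvW (pvAp pvZC (pvAp perm ch)) < pvW (pvAp perm ch) := by
          rw [h1]; decide
        obtain ⟨hstep, hap⟩ := step pvZC pv_keys_ZC hw
        rw [List.map_cons, pvALoop_cons, if_pos h1, ← List.map_cons, hstep,
            pvBLoop_cons perm ch r, pvBInner_eq, if_pos h1,
            pvBLoop_cons (pvCompose perm pvZC) ch r, hap]
        simp
      · by_cases h2 : pvAp perm ch = 'D'
        · have hw : pvW (pvAp pvZCC (pvAp perm ch)) < pvW (pvAp perm ch) := by
            rw [h2]; decide
          obtain ⟨hstep, hap⟩ := step pvZCC pv_keys_ZCC hw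
          rw [List.map_cons, pvALoop_cons, if_neg h1, if_pos h2, ← List.map_cons, hstep,
              pvBLoop_cons perm ch r, pvBInner_eq, if_neg h1, if_pos h2,
              pvBLoop_cons (pvCompose perm pvZCC) ch r, hap]
          simp
        · by_cases h3 : pvAp perm ch = 'f' ∨ pvAp perm ch = 'F'
          · have hw : pvW (pvAp pvXC (pvAp perm ch)) < pvW (pvAp perm ch) := by
              rcases h3 with h | h <;> rw [h] <;> decide
            obtain ⟨hstep, hap⟩ := step pvXC pv_keys_XC hw
            rw [List.map_cons, pvALoop_cons, if_neg h1, if_neg h2, if_pos h3, ← List.map_cons, hstep,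
                pvBLoop_cons perm ch r, pvBInner_eq, if_neg h1, if_neg h2, if_pos h3,
                pvBLoop_cons (pvCompose perm pvXC) ch r, hap]
            simp
          · by_cases h4 : pvAp perm ch = 'b' ∨ pvAp perm ch = 'B'
            · have hw : pvW (pvAp pvXCC (pvAp perm ch)) < pvW (pvAp perm ch) := by
                rcases h4 with h | h <;> rw [h] <;> decide
              obtain ⟨hstep, hap⟩ := step pvXCC pv_keys_XCC hw
              rw [List.map_cons, pvALoop_cons, if_neg h1, if_neg h2, if_neg h3, if_pos h4, ← List.map_cons, hstep,
                  pvBLoop_cons perm ch r, pvBInner_eq, if_neg h1, if_neg h2, if_neg h3, if_pos h4,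
                  pvBLoop_cons (pvCompose perm pvXCC) ch r, hap]
              simp
            · have hle'' : pvMeas (r.map (pvAp perm)) ≤ n := by
                have := pvMeas_le (r.map (pvAp perm))
                rw [List.length_map] at this
                omega
              rw [List.map_cons, pvALoop_cons, if_neg h1, if_neg h2, if_neg h3, if_neg h4,
                  pvBLoop_cons perm ch r, pvBInner_eq, if_neg h1, if_neg h2, if_neg h3, if_neg h4,
                  ih r perm hk hle'']
              simp

theorem pv_ap_id (l : List Char) (c : Char) :
    pvAp (PySem.Dict.mk (l.map (fun x => (x, x)))) c = c := by
  induction l with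
  | nil => rfl
  | cons a rest ih =>
    simp only [pvAp, PySem.Dict.getD_eq_get?_getD, List.map_cons, PySem.Dict.get?_mk_cons] at ih ⊢
    cases h : (a == c)
    · simpa [h] using ih
    · simp [eq_of_beq h]

theorem pv_perm0_keys : pvPerm0.keys = pvBase := by decide

-- ===== VERDICT (by name: the statement is the Claim_ definition above) =====
theorem convert_moves_to_nice_moves_spec : Claim_equal_convert_moves_to_nice_moves := by
  intro s _hdom
  unfold Spec_convert_moves_to_nice_moves convert_moves_to_nice_moves convert_moves_to_nice_moves_alt
  congr 1
  have hmap : s.toList.map (pvAp pvPerm0) = s.toList := by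
    have h0 : pvPerm0 = PySem.Dict.mk (pvBase.map (fun x => (x, x))) := rfl
    calc s.toList.map (pvAp pvPerm0) = s.toList.map id :=
          List.map_congr_left (fun a _ => by rw [h0]; exact pv_ap_id pvBase a)
      _ = s.toList := List.map_id _
  have h := pv_main (pvMeas (s.toList.map (pvAp pvPerm0))) s.toList pvPerm0 pv_perm0_keys le_rfl
  rw [hmap] at h
  exact h
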